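-- pv_equiv track=rewrite | github.com/deeplethe/ForgeRAG | api/auth/authz.py | minimize_paths
-- ===== SOURCE A (Python) =====
-- def _path_starts_with(child: str, parent: str) -> bool:
--     """True iff ``parent`` is an ancestor (inclusive) of ``child`` in
--     the folder tree. ``parent='/'`` matches anything."""
--     if parent in ("/", child):
--         return True
--     parent = parent.rstrip("/")
--     return child == parent or child.startswith(parent + "/")
--
-- def minimize_paths(paths: list[str]) -> list[str]:
--     """Drop redundant subpaths. ``['/a', '/a/b', '/x']`` → ``['/a', '/x']``.
--
--     The retrieval-layer OR-clause shrinks accordingly; '/' subsumes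
--     everything (output collapses to ``['/']``). Output is sorted
--     lexically so callers and tests can rely on a stable order.
--     """
--     if not paths:
--         return []
--     # Dedup, sort by length so shorter (potential ancestors) come first.
--     uniq = sorted(set(paths), key=lambda p: (len(p), p))
--     out: list[str] = []
--     for p in uniq:
--         if any(_path_starts_with(p, existing) for existing in out):
--             continue
--         out.append(p)
--     return sorted(out)
-- ===== SOURCE B (Python) =====
-- def minimize_paths(paths: list[str]) -> list[str]:
--     """Same result as A, but the inner scan over already-kept paths is
--     replaced by a hash-set of kept (rstripped) ancestors probed at the
--     '/'-boundary prefixes of each candidate."""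
--     if not paths:
--         return []
--     out: list[str] = []
--     kept: set[str] = set()
--     root = False
--     for p in sorted(set(paths), key=lambda q: (len(q), q)):
--         if root:
--             continue
--         drop = False
--         for i in range(len(p) + 1):
--             if (i == len(p) or p[i] == "/") and p[:i] in kept:
--                 drop = True
--                 break
--         if not drop:
--             out.append(p)
--             kept.add(p.rstrip("/"))
--             if p == "/":
--                 root = True
--     return sorted(out)
-- ===== Notes on version B (the rewrite author's own statement) =====
-- stated objective: faster
-- what changed: The O(n) inner scan of all kept paths per candidate is replaced by a hash set of the kept (rstripped) paths probed only at the candidate's '/'-boundary prefixes, plus a root flag for the '/' short-circuit.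
import Mathlib
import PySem

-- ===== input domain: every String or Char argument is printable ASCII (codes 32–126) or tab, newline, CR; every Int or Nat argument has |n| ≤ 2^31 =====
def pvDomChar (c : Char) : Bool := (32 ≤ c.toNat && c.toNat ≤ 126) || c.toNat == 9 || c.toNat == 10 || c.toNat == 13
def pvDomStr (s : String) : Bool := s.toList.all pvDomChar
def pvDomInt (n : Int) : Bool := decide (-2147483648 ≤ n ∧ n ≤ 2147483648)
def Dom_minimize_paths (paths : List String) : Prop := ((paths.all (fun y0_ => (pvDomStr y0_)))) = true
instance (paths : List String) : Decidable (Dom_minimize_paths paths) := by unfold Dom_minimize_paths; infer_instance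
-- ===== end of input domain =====

-- B replaces A's scan over all kept paths per candidate by a hash set of the kept
-- (rstripped) paths probed at the candidate's '/'-boundary prefixes (objective: faster).

-- ===== PORT A =====
-- exact port of str.rstrip("/") (the strip set is the single character '/')
def pvRstripSlash (s : String) : String := String.ofList ((s.toList.reverse.dropWhile (· == '/')).reverse)

def pvPathStartsWith (child parent : String) : Bool :=
  if parent = "/" ∨ parent = child then true
  else
    let parent' := pvRstripSlash parent
    decide (child = parent') || PySem.Str.startswith child (parent' ++ "/")

def minimize_paths (paths : List String) : List String :=
  if paths = [] then []
  else
    let uniq := PySem.List.sorted2 (PySem.Set.ofList paths) (fun p => PySem.Str.len p) (fun p => p) false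
    let out := uniq.foldl (fun out p => if out.any (fun e => pvPathStartsWith p e) then out else out ++ [p]) []
    PySem.List.sorted out (fun p => p) false

-- ===== PORT B =====
-- '(i == len(p) or p[i] == "/")' of Source B's inner loop
def pvBoundary (cs : List Char) (i : Nat) : Bool := decide (i = cs.length) || decide (cs[i]? = some '/')

def minimize_paths_alt (paths : List String) : List String :=
  if paths = [] then []
  else
    let uniq := PySem.List.sorted2 (PySem.Set.ofList paths) (fun p => PySem.Str.len p) (fun p => p) false
    let st := uniq.foldl (fun (st : List String × PySem.Set String × Bool) p =>
        if st.2.2 then st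
        else if ((List.range (p.toList.length + 1)).any
            (fun i => pvBoundary p.toList i && PySem.Set.contains st.2.1 (String.ofList (p.toList.take i)))) then st
        else (st.1 ++ [p], PySem.Set.add st.2.1 (pvRstripSlash p), st.2.2 || decide (p = "/")))
      ([], PySem.Set.empty, false)
    PySem.List.sorted st.1 (fun p => p) false

-- ===== PRECONDITION & SPEC =====
def Spec_minimize_paths (paths : List String) (out : List String) : Prop := out = minimize_paths_alt paths
instance (paths : List String) (out : List String) : Decidable (Spec_minimize_paths paths out) := by unfold Spec_minimize_paths; infer_instance

-- ===== CLAIM (what is proved, stated in full; the proofs are below) =====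
def Claim_equal_minimize_paths : Prop := ∀ (paths : List String), Dom_minimize_paths paths → Spec_minimize_paths paths (minimize_paths paths)

-- ===== LEMMAS AND PROOFS =====

-- a '/'-boundary prefix of cs equal to q is the same as "cs = q or q ++ '/' is a prefix of cs"
lemma pv_boundary_prefix_iff (cs q : List Char) :
    (cs = q ∨ (q ++ ['/']) <+: cs) ↔
    ∃ i, i ≤ cs.length ∧ (i = cs.length ∨ cs[i]? = some '/') ∧ cs.take i = q := by
  constructor
  · rintro (rfl | ⟨r, hr⟩)
    · exact ⟨cs.length, le_rfl, Or.inl rfl, List.take_length⟩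
    · subst hr
      refine ⟨q.length, ?_, Or.inr ?_, ?_⟩
      · simp
      · rw [List.append_assoc]; simp
      · rw [List.append_assoc, List.take_left]
  · rintro ⟨i, hle, hb, ht⟩
    rcases hb with rfl | hget
    · rw [List.take_length] at ht; exact Or.inl ht
    · right
      have hi : i < cs.length := (List.getElem?_eq_some_iff.mp hget).1
      refine ⟨cs.drop (i + 1), ?_⟩
      rw [List.append_assoc]
      conv_rhs => rw [← List.take_append_drop i cs]
      rw [List.drop_eq_getElem_cons hi]
      simp [ht, (List.getElem?_eq_some_iff.mp hget).2]

-- A's ancestor test against a single kept parent, rephrased as B's boundary-prefix probe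
lemma pv_psw_iff (p e : String) (hne : e ≠ p) :
    pvPathStartsWith p e = true ↔
      e = "/" ∨ ∃ i, i ≤ p.toList.length ∧ pvBoundary p.toList i = true ∧
        p.toList.take i = (pvRstripSlash e).toList := by
  unfold pvPathStartsWith
  by_cases he : e = "/"
  · simp [he]
  · rw [if_neg (by tauto)]
    have hsw : PySem.Str.startswith p (pvRstripSlash e ++ "/") = true ↔
        ((pvRstripSlash e).toList ++ ['/']) <+: p.toList := by
      rw [PySem.Str.startswith_eq, PySem.Chars.startswith_iff]
      simp
    have heq : (p = pvRstripSlash e) ↔ p.toList = (pvRstripSlash e).toList := String.ext_iff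
    simp only [Bool.or_eq_true, decide_eq_true_eq, hsw, heq]
    rw [pv_boundary_prefix_iff]
    constructor
    · intro h; right
      obtain ⟨i, h1, h2, h3⟩ := h
      refine ⟨i, h1, ?_, h3⟩
      simp only [pvBoundary, Bool.or_eq_true, decide_eq_true_eq]
      exact h2
    · rintro (h | ⟨i, h1, h2, h3⟩)
      · exact absurd h he
      · refine ⟨i, h1, ?_, h3⟩
        simpa only [pvBoundary, Bool.or_eq_true, decide_eq_true_eq] using h2

-- A's drop condition over the kept list equals B's root-flag / hash-set probe
lemma pv_drop_eq (p : String) (out : List String) (kept : PySem.Set String) (root : Bool)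
    (hp : p ∉ out)
    (hroot : root = decide ("/" ∈ out))
    (hkept : ∀ s, PySem.Set.contains kept s = true ↔ ∃ e ∈ out, pvRstripSlash e = s) :
    (out.any (fun e => pvPathStartsWith p e)) =
      (root || (List.range (p.toList.length + 1)).any
        (fun i => pvBoundary p.toList i && PySem.Set.contains kept (String.ofList (p.toList.take i)))) := by
  rw [Bool.eq_iff_iff]
  simp only [List.any_eq_true, Bool.or_eq_true, Bool.and_eq_true, List.mem_range]
  constructor
  · rintro ⟨e, he, hpsw⟩
    have hne : e ≠ p := fun h => hp (h ▸ he)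
    rcases (pv_psw_iff p e hne).mp hpsw with rfl | ⟨i, h1, h2, h3⟩
    · left; rw [hroot]; simpa using he
    · right
      refine ⟨i, by omega, h2, (hkept _).mpr ⟨e, he, ?_⟩⟩
      rw [String.ext_iff]
      simp [h3]
  · rintro (hr | ⟨i, hi, hb, hc⟩)
    · rw [hroot] at hr
      exact ⟨"/", by simpa using hr, by simp [pvPathStartsWith]⟩
    · obtain ⟨e, he, hse⟩ := (hkept _).mp hc
      have hne : e ≠ p := fun h => hp (h ▸ he)
      refine ⟨e, he, (pv_psw_iff p e hne).mpr (Or.inr ⟨i, by omega, hb, ?_⟩)⟩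
      rw [hse]
      simp

-- the two per-element loop bodies, named so the fold induction can talk about them
def pvStepA (out : List String) (p : String) : List String :=
  if out.any (fun e => pvPathStartsWith p e) then out else out ++ [p]
def pvStepB (st : List String × PySem.Set String × Bool) (p : String) :
    List String × PySem.Set String × Bool :=
  if st.2.2 then st
  else if ((List.range (p.toList.length + 1)).any
      (fun i => pvBoundary p.toList i && PySem.Set.contains st.2.1 (String.ofList (p.toList.take i)))) then st
  else (st.1 ++ [p], PySem.Set.add st.2.1 (pvRstripSlash p), st.2.2 || decide (p = "/"))

-- the two folds keep the same out list
lemma pv_fold_eq : ∀ (l : List String) (out : List String) (kept : PySem.Set String) (root : Bool),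
    l.Nodup → (∀ p ∈ l, p ∉ out) →
    root = decide ("/" ∈ out) →
    (∀ s, PySem.Set.contains kept s = true ↔ ∃ e ∈ out, pvRstripSlash e = s) →
    (l.foldl pvStepA out) = (l.foldl pvStepB (out, kept, root)).1 := by
  intro l
  induction l with
  | nil => intro out kept root _ _ _ _; rfl
  | cons p t ih =>
    intro out kept root hnd hnotin hroot hkept
    have hp : p ∉ out := hnotin p (List.mem_cons_self ..)
    have hdrop := pv_drop_eq p out kept root hp hroot hkept
    simp only [List.foldl_cons]
    by_cases hr : root = true
    · have hA : pvStepA out p = out := by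
        unfold pvStepA; rw [hdrop, hr]; simp
      have hB : pvStepB (out, kept, root) p = (out, kept, root) := by
        unfold pvStepB; rw [hr]; simp
      rw [hA, hB]
      exact ih out kept root hnd.of_cons (fun q hq => hnotin q (List.mem_cons_of_mem _ hq)) hroot hkept
    · have hr' : root = false := by simpa using hr
      by_cases hd : ((List.range (p.toList.length + 1)).any
          (fun i => pvBoundary p.toList i && PySem.Set.contains kept (String.ofList (p.toList.take i)))) = true
      · have hA : pvStepA out p = out := by unfold pvStepA; rw [hdrop, hd]; simp
        have hB : pvStepB (out, kept, root) p = (out, kept, root) := by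
          unfold pvStepB; rw [hr']; simpa using hd
        rw [hA, hB]
        exact ih out kept root hnd.of_cons (fun q hq => hnotin q (List.mem_cons_of_mem _ hq)) hroot hkept
      · have hd' := eq_false_of_ne_true hd
        have hA : pvStepA out p = out ++ [p] := by
          unfold pvStepA; rw [hdrop, hr', hd']; simp
        have hB : pvStepB (out, kept, root) p
            = (out ++ [p], PySem.Set.add kept (pvRstripSlash p), root || decide (p = "/")) := by
          unfold pvStepB; rw [hr']; simp only [Bool.false_eq_true, if_false]; rw [hd']; simp
        rw [hA, hB]
        refine ih (out ++ [p]) (PySem.Set.add kept (pvRstripSlash p)) (root || decide (p = "/"))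
          hnd.of_cons ?_ ?_ ?_
        · intro q hq
          simp only [List.mem_append, List.mem_singleton]
          rintro (h | rfl)
          · exact hnotin q (List.mem_cons_of_mem _ hq) h
          · exact (List.nodup_cons.mp hnd).1 hq
        · rw [hroot] at hr' ⊢
          simp only [decide_eq_false_iff_not] at hr'
          simp [hr', eq_comm]
        · intro s
          constructor
          · intro hc
            have : s ∈ PySem.Set.add kept (pvRstripSlash p) := by
              simpa [PySem.Set.contains] using hc
            rcases (PySem.Set.mem_add kept (pvRstripSlash p) s).mp this with h | h
            · have := (hkept s).mp (by simpa [PySem.Set.contains] using h)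
              obtain ⟨e, he, hes⟩ := this
              exact ⟨e, List.mem_append_left _ he, hes⟩
            · exact ⟨p, List.mem_append_right _ (List.mem_singleton.mpr rfl), h.symm⟩
          · rintro ⟨e, he, hes⟩
            rcases List.mem_append.mp he with h | h
            · have := (hkept s).mpr ⟨e, h, hes⟩
              have hmem : s ∈ kept := by simpa [PySem.Set.contains] using this
              simpa [PySem.Set.contains] using (PySem.Set.mem_add kept (pvRstripSlash p) s).mpr (Or.inl hmem)
            · have : e = p := List.mem_singleton.mp h
              subst this
              simpa [PySem.Set.contains] using
                (PySem.Set.mem_add kept (pvRstripSlash e) s).mpr (Or.inr hes.symm)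

-- ===== VERDICT (by name: the statement is the Claim_ definition above) =====
theorem minimize_paths_spec : Claim_equal_minimize_paths := by
  intro paths _
  unfold Spec_minimize_paths minimize_paths minimize_paths_alt
  by_cases h : paths = []
  · simp [h]
  · simp only [h, if_false]
    refine congrArg (fun l => PySem.List.sorted l (fun p => p) false) ?_
    show (PySem.List.sorted2 (PySem.Set.ofList paths) (fun p => PySem.Str.len p) (fun p => p) false).foldl
        pvStepA []
      = ((PySem.List.sorted2 (PySem.Set.ofList paths) (fun p => PySem.Str.len p) (fun p => p) false).foldl
        pvStepB ([], PySem.Set.empty, false)).1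
    apply pv_fold_eq
    · exact (PySem.List.sorted2_perm (PySem.Set.ofList paths) _ _ false).symm.nodup
        (PySem.Set.nodup_ofList paths)
    · intro p _ hc; simp at hc
    · simp
    · intro s
      constructor
      · intro hc; simp [PySem.Set.contains, PySem.Set.empty] at hc
      · rintro ⟨e, he, -⟩; simp at he
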